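-- pv_equiv track=rewrite | github.com/AlanBessauer/Gitgud | t1/t1parte1.py | charfound
-- ===== SOURCE A (Python) =====
-- def charfound(c,s):
-- 	x = len(s)
-- 	if len(s)==1:
-- 		return False
-- 	elif c == s[x-1]:
-- 		return True
-- 	else:
-- 		return charfound(c,s[0:x-1])
-- ===== SOURCE B (Python) =====
-- def charfound(c, s):
--     return any(c == ch for ch in s[1:])
-- ===== Notes on version B (the rewrite author's own statement) =====
-- stated objective: faster
-- what changed: Replaced the tail recursion that copies a one-shorter slice each step (quadratic) with a single forward any() scan over s[1:].
-- outside the precondition, e.g. on charfound('a', ''): A raises IndexError, B returns False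
-- crash fix: On the empty string A raises IndexError (it reads s[-1]); B returns False. — e.g. on charfound("a", ""): A raises IndexError, B returns false
import Mathlib
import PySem

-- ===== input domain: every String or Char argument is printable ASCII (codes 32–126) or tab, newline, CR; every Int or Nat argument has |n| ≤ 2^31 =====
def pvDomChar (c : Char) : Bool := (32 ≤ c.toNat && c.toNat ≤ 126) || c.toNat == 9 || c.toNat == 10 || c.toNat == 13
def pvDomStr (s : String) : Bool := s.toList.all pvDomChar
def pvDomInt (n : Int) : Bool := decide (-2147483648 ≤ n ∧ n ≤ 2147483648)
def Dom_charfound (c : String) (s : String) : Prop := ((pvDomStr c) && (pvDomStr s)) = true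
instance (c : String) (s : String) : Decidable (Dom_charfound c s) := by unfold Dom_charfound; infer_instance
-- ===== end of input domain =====

-- B is a simpler single forward scan over s[1:] instead of A's recursion slicing off the
-- last character each step; on the empty string A raises IndexError while B returns False.

-- ===== PORT A =====
-- A's recursion, on the character list of s: x = len(s); len(s)==1 → False;
-- c == s[x-1] → True; else recurse on s[0:x-1].  pyGet? is none exactly where
-- Python's s[x-1] raises (only the empty string); the recursion never reaches that case.
def chfA (c : String) (l : List Char) : Bool :=
  if l.length = 1 then false
  else
    match hh : PySem.List.pyGet? l ((l.length : Int) - 1) with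
    | none => false  -- Python raises IndexError here (s = ""); excluded by Pre_
    | some ch =>
      if c == String.ofList [ch] then true
      else chfA c (PySem.List.slice l (some 0) (some ((l.length : Int) - 1)))
termination_by l.length
decreasing_by
  cases l with
  | nil => simp [PySem.List.pyGet?, PySem.List.pyIdx?] at hh
  | cons a t => simp

def charfound (c : String) (s : String) : Bool := chfA c s.toList

-- ===== PORT B =====
-- Source B: any(c == ch for ch in s[1:])
def charfound_alt (c : String) (s : String) : Bool :=
  (PySem.List.slice s.toList (some 1) none).any (fun ch => c == String.ofList [ch])

-- ===== PRECONDITION & SPEC =====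
-- Pre_ excludes only the empty string, on which A raises IndexError (s[-1]).
def Pre_charfound (c : String) (s : String) : Prop := s.toList ≠ []
instance (c : String) (s : String) : Decidable (Pre_charfound c s) := by
  unfold Pre_charfound; infer_instance

def pvWitness_charfound : String × String := ("a", "ba")

-- On the empty string A raises IndexError (it reads s[-1]); B returns False.
def Raises_charfound (c : String) (s : String) : Prop := s.toList = []
instance (c : String) (s : String) : Decidable (Raises_charfound c s) := by
  unfold Raises_charfound; infer_instance
def pvRaiseWitness_charfound : String × String := ("a", "")
def pvRaiseWitnessOut_charfound : Bool := false

def Spec_charfound (c : String) (s : String) (out : Bool) : Prop := out = charfound_alt c s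
instance (c : String) (s : String) (out : Bool) : Decidable (Spec_charfound c s out) := by
  unfold Spec_charfound; infer_instance

-- ===== CLAIM (what is proved, stated in full; the proofs are below) =====
def Claim_equal_charfound : Prop := ∀ (c : String) (s : String), Dom_charfound c s → Pre_charfound c s → Spec_charfound c s (charfound c s)
def Claim_raises_charfound : Prop := (∀ (c : String) (s : String), Dom_charfound c s → Raises_charfound c s → ¬ Pre_charfound c s) ∧ (Dom_charfound (pvRaiseWitness_charfound.1) (pvRaiseWitness_charfound.2) ∧ Raises_charfound (pvRaiseWitness_charfound.1) (pvRaiseWitness_charfound.2) ∧ charfound_alt (pvRaiseWitness_charfound.1) (pvRaiseWitness_charfound.2) = pvRaiseWitnessOut_charfound)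

-- ===== LEMMAS AND PROOFS =====

-- A's backward recursion computes exactly "c matches some character of l.tail".
theorem chfA_eq (c : String) (l : List Char) (h : l ≠ []) :
    chfA c l = l.tail.any (fun ch => c == String.ofList [ch]) := by
  induction hn : l.length using Nat.strong_induction_on generalizing l with
  | _ n ih =>
    match l, h with
    | [a], _ => simp [chfA]
    | a :: b :: t, _ =>
      rw [chfA]
      have hlen : (a :: b :: t).length = t.length + 2 := by simp
      have hcast : ((a :: b :: t).length : Int) - 1 = ((t.length + 1 : Nat) : Int) := by
        rw [hlen]; push_cast; ring
      have hget : PySem.List.pyGet? (a :: b :: t) (((a :: b :: t).length : Int) - 1)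
          = some ((a :: b :: t).getLast (by simp)) := by
        rw [hcast, PySem.List.pyGet?_natCast]
        rw [List.getElem?_eq_getElem (by simp)]
        congr 1
        rw [List.getLast_eq_getElem]
        simp
      have hslice : PySem.List.slice (a :: b :: t) (some 0) (some (((a :: b :: t).length : Int) - 1))
          = (a :: b :: t).dropLast := by
        rw [hcast, PySem.List.slice_zero_start, PySem.List.slice_to_natCast]
        rw [List.dropLast_eq_take]
        simp
      have hmem : (a :: b :: t).getLast (by simp) ∈ (b :: t) := by
        simpa using List.getLast_mem (l := a :: b :: t) (by simp)
      rw [if_neg (by simp)]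
      split
      · rename_i heq
        rw [hget] at heq
        cases heq
      · rename_i ch heq
        rw [hget] at heq
        obtain rfl : (a :: b :: t).getLast (by simp) = ch := by injection heq
        split_ifs with hc
        · simp only [List.tail_cons]
          symm
          rw [List.any_eq_true]
          exact ⟨_, hmem, hc⟩
        · rw [hslice]
          have hdl : (a :: b :: t).dropLast ≠ [] := by simp
          rw [ih ((a :: b :: t).dropLast).length
            (by rw [List.length_dropLast]; omega) _ hdl rfl]
          have hsplit : (b :: t) = (a :: b :: t).dropLast.tail
              ++ [(a :: b :: t).getLast (by simp)] := by
            have h1 : (a :: b :: t).dropLast.tail = (b :: t).dropLast := by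
              cases t <;> simp
            have h2 : (a :: b :: t).getLast (by simp) = (b :: t).getLast (by simp) := by
              simp [List.getLast_cons]
            rw [h1, h2]
            exact (List.dropLast_append_getLast (by simp)).symm
          conv_rhs => rw [show (a :: b :: t).tail = b :: t from rfl, hsplit]
          have hlast : (c == String.ofList [(a :: b :: t).getLast (by simp)]) = false :=
            Bool.eq_false_iff.mpr hc
          simp only [List.any_append, List.any_cons, List.any_nil, hlast, Bool.or_false]

theorem charfound_spec : Claim_equal_charfound := by
  intro c s _ hpre
  unfold Spec_charfound charfound charfound_alt
  rw [chfA_eq c s.toList hpre, PySem.List.slice_from_one]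

@[simp] theorem charfound_raises : Claim_raises_charfound := by
  unfold Claim_raises_charfound
  constructor
  · intro c s _ hr hp; exact hp hr
  · exact ⟨by decide, by decide, by decide⟩
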